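-- pv_equiv track=rewrite | github.com/AlexandruAndrita/python_assignments | programming_in_python/homework 6/submission 2/ex2.py | newline_character
-- ===== SOURCE A (Python) =====
-- def newline_character(word):
--     new_word=""
--     for c in range(len(word)):
--         if word[c]=="\n":
--             new_word+="\\n"
--         else:
--             new_word+=word[c]
--     return new_word
-- ===== SOURCE B (Python) =====
-- def newline_character(word):
--     return "\\n".join(word.split("\n"))
-- ===== Notes on version B (the rewrite author's own statement) =====
-- stated objective: simpler
-- what changed: Replaces the per-index loop with a conditional and repeated string concatenation by a two-phase decomposition: split the string on the newline character, then rejoin the segments with the two-character escape sequence.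
import Mathlib
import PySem

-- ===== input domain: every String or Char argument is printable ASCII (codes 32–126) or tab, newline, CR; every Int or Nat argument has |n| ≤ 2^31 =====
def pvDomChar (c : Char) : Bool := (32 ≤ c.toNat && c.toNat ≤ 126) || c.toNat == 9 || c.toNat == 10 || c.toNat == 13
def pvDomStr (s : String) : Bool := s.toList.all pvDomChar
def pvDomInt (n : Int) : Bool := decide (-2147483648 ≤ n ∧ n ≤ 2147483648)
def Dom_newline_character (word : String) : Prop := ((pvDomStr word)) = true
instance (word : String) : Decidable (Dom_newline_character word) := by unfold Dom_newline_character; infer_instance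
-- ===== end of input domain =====

-- B replaces A's per-index accumulating loop by split-on-newline then rejoin with "\\n" (simpler decomposition).

-- ===== PORT A =====
-- for c in range(len(word)): if word[c]=="\n": new_word+="\\n" else: new_word+=word[c]
def newline_character (word : String) : String :=
  String.mk ((PySem.List.pyRange 0 (PySem.List.len word.toList) 1).foldl
    (fun acc j =>
      if PySem.List.pyGetD word.toList j ' ' = '\n'
      then acc ++ ['\\', 'n']
      else acc ++ [PySem.List.pyGetD word.toList j ' '])
    [])

-- ===== PORT B =====
-- "\\n".join(word.split("\n")), via the exact Chars forms of str.split / str.join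
def newline_character_alt (word : String) : String :=
  String.mk (PySem.Chars.join ['\\', 'n'] (PySem.Chars.splitOn word.toList ['\n']))

-- ===== PRECONDITION & SPEC =====
def Spec_newline_character (word : String) (out : String) : Prop := out = newline_character_alt word
instance (word : String) (out : String) : Decidable (Spec_newline_character word out) := by unfold Spec_newline_character; infer_instance

-- ===== CLAIM (what is proved, stated in full; the proofs are below) =====
def Claim_equal_newline_character : Prop := ∀ (word : String), Dom_newline_character word → Spec_newline_character word (newline_character word)

-- ===== LEMMAS AND PROOFS =====

-- the escaping of one character
def pvEsc (c : Char) : List Char := if c = '\n' then ['\\', 'n'] else [c]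

-- reference shape of splitOn's fuelled loop (cur is the reversed current segment)
def pvSplit : List Char → List Char → List (List Char)
  | cur, [] => [cur.reverse]
  | cur, c :: rest =>
    if c = '\n' then cur.reverse :: pvSplit [] rest else pvSplit (c :: cur) rest

theorem pvSplit_ne_nil (cur l : List Char) : pvSplit cur l ≠ [] := by
  induction l generalizing cur with
  | nil => simp [pvSplit]
  | cons c rest ih =>
    by_cases h : c = '\n' <;> simp [pvSplit, h] <;> exact ih _

theorem splitOn_go_eq (fuel : Nat) :
    ∀ (l cur : List Char) (acc : List (List Char)), l.length ≤ fuel →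
    PySem.Chars.splitOn.go ['\n'] fuel l cur acc = acc.reverse ++ pvSplit cur l := by
  induction fuel with
  | zero =>
    intro l cur acc h
    have hl : l = [] := List.eq_nil_of_length_eq_zero (Nat.le_zero.mp h)
    subst hl
    simp [PySem.Chars.splitOn.go, pvSplit]
  | succ fuel ih =>
    intro l cur acc h
    cases l with
    | nil => simp [PySem.Chars.splitOn.go, pvSplit]
    | cons c rest =>
      rw [PySem.Chars.splitOn.go.eq_def]
      simp only []
      by_cases hc : c = '\n'
      · subst hc
        rw [if_pos (by simp [List.isPrefixOf])]
        simp only [List.length_singleton, List.length_cons, List.length_nil,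
          Nat.zero_add, List.drop_succ_cons, List.drop_zero]
        rw [ih rest [] _ (Nat.le_of_succ_le_succ h)]
        simp [pvSplit]
      · rw [if_neg (by simp [List.isPrefixOf]; exact fun h' => hc h'.symm)]
        rw [ih rest (c :: cur) acc (Nat.le_of_succ_le_succ h)]
        simp [pvSplit, hc]

theorem join_pvSplit (l cur : List Char) :
    PySem.Chars.join ['\\', 'n'] (pvSplit cur l) = cur.reverse ++ l.flatMap pvEsc := by
  induction l generalizing cur with
  | nil => simp [pvSplit, PySem.Chars.join_singleton]
  | cons c rest ih =>
    by_cases hc : c = '\n'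
    · subst hc
      obtain ⟨q, qs, hq⟩ := List.exists_cons_of_ne_nil (pvSplit_ne_nil [] rest)
      have hsp : pvSplit cur ('\n' :: rest) = cur.reverse :: pvSplit [] rest := by
        simp [pvSplit]
      rw [hsp, hq, PySem.Chars.join_cons_cons, ← hq, ih]
      simp [pvEsc]
    · have hsp : pvSplit cur (c :: rest) = pvSplit (c :: cur) rest := by
        simp [pvSplit, hc]
      rw [hsp, ih]
      simp [pvEsc, hc]

-- ===== VERDICT (by name: the statement is the Claim_ definition above) =====
theorem newline_character_spec : Claim_equal_newline_character := by
  intro word _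
  unfold Spec_newline_character newline_character newline_character_alt
  congr 1
  have hA :
      (PySem.List.pyRange 0 (PySem.List.len word.toList) 1).foldl
        (fun acc j =>
          if PySem.List.pyGetD word.toList j ' ' = '\n'
          then acc ++ ['\\', 'n']
          else acc ++ [PySem.List.pyGetD word.toList j ' ']) [] =
      word.toList.foldl (fun acc c => acc ++ pvEsc c) [] := by
    have := PySem.List.foldl_pyRange_zero_pyGetD word.toList ' '
      (fun acc c => acc ++ pvEsc c) []
    rw [← this]
    apply PySem.List.foldl_congr_mem
    intro acc j _
    simp only [pvEsc]
    split <;> rfl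
  rw [hA, PySem.List.foldl_append_eq_flatMap, PySem.Chars.splitOn,
    splitOn_go_eq _ _ _ _ (Nat.le_succ _)]
  simp [join_pvSplit]
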